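-- pv_equiv track=rewrite | github.com/kiarro/NavigationSystem | Main.py | create_text_file_path
-- ===== SOURCE A (Python) =====
-- def create_text_file_path(path1):
--     path = ""
--     l = 1
--     droplets = path1.split("\\")
--     for i in droplets:
--         if l < len(droplets):
--             path = path + i
--             path = path + "\\"
--         l = l + 1
--     path = path + "Text_Map.txt"
--     return path
-- ===== SOURCE B (Python) =====
-- def create_text_file_path(path1):
--     i = path1.rfind("\\")
--     return path1[:i + 1] + "Text_Map.txt"
-- ===== Notes on version B (the rewrite author's own statement) =====
-- stated objective: simpler
-- what changed: Instead of splitting the path into components and re-joining all but the last in a counter-driven loop, B locates the last backslash with rfind and slices the prefix up to and including it (rfind's -1 plus 1 giving the empty prefix when there is no separator).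
import Mathlib
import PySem

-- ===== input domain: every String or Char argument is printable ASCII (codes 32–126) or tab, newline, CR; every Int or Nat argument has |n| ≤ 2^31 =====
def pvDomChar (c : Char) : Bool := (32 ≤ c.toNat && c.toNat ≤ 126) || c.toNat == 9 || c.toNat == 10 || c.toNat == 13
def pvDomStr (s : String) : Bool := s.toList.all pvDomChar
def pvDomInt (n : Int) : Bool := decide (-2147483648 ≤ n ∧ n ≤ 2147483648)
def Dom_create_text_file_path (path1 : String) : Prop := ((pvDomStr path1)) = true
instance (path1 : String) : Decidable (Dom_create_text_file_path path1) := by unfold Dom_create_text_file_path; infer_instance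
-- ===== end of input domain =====

-- B replaces A's split-into-components-and-rejoin loop by a single rfind of the last
-- backslash plus a prefix slice (objective: simpler).

-- ===== PORT A =====
def create_text_file_path (path1 : String) : String :=
  let droplets := PySem.Chars.splitOn path1.toList ['\\']
  let r := droplets.foldl
    (fun (st : List Char × Int) i =>
      (if st.2 < (droplets.length : Int) then st.1 ++ i ++ ['\\'] else st.1, st.2 + 1))
    ([], 1)
  String.ofList (r.1 ++ "Text_Map.txt".toList)

-- ===== PORT B =====
def create_text_file_path_alt (path1 : String) : String :=
  let i := PySem.Chars.rfind path1.toList ['\\']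
  String.ofList (PySem.Chars.slice path1.toList none (some (i + 1)) ++ "Text_Map.txt".toList)

-- ===== PRECONDITION & SPEC =====
def Spec_create_text_file_path (path1 : String) (out : String) : Prop := out = create_text_file_path_alt path1
instance (path1 : String) (out : String) : Decidable (Spec_create_text_file_path path1 out) := by unfold Spec_create_text_file_path; infer_instance

-- ===== CLAIM (what is proved, stated in full; the proofs are below) =====
def Claim_equal_create_text_file_path : Prop := ∀ (path1 : String), Dom_create_text_file_path path1 → Spec_create_text_file_path path1 (create_text_file_path path1)

-- ===== LEMMAS AND PROOFS =====

-- Specification split of a char list at a single character.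
def pvSplitc (c : Char) : List Char → List (List Char)
  | [] => [[]]
  | x :: xs =>
    if x = c then [] :: pvSplitc c xs
    else
      match pvSplitc c xs with
      | [] => [[x]]
      | h :: t => (x :: h) :: t

theorem pvSplitc_ne_nil (c : Char) (xs : List Char) : pvSplitc c xs ≠ [] := by
  induction xs with
  | nil => simp [pvSplitc]
  | cons x xs ih =>
    simp only [pvSplitc]
    split
    · simp
    · cases h : pvSplitc c xs with
      | nil => simp
      | cons h t => simp

-- splitOn.go for a single-char separator computes pvSplitc (with the pending piece prepended).
theorem pvGo_eq (c : Char) (l : List Char) :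
    ∀ (fuel : Nat) (cur : List Char) (acc : List (List Char)), l.length ≤ fuel →
      PySem.Chars.splitOn.go [c] fuel l cur acc =
        acc.reverse ++ (match pvSplitc c l with
                        | [] => [cur.reverse]
                        | h :: t => (cur.reverse ++ h) :: t) := by
  induction l with
  | nil =>
    intro fuel cur acc _
    cases fuel with
    | zero => simp [PySem.Chars.splitOn.go, pvSplitc]
    | succ f => simp [PySem.Chars.splitOn.go, pvSplitc]
  | cons x xs ih =>
    intro fuel cur acc hf
    cases fuel with
    | zero => simp at hf
    | succ f =>
      have hf' : xs.length ≤ f := by simpa using hf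
      by_cases hx : x = c
      · have hpre : [c].isPrefixOf (x :: xs) = true := by
          simp [List.isPrefixOf, hx]
        rw [PySem.Chars.splitOn.go, if_pos hpre]
        simp only [List.length_cons, List.length_nil, List.drop_succ_cons, List.drop_zero]
        rw [ih f [] (cur.reverse :: acc) hf']
        simp only [pvSplitc, if_pos hx]
        cases h : pvSplitc c xs with
        | nil => exact absurd h (pvSplitc_ne_nil c xs)
        | cons h t => simp
      · have hpre : [c].isPrefixOf (x :: xs) = false := by
          simp [List.isPrefixOf]
          intro h; exact absurd h.symm hx
        rw [PySem.Chars.splitOn.go, if_neg (by simp [hpre])]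
        rw [ih f (x :: cur) acc hf']
        simp only [pvSplitc, if_neg hx]
        cases h : pvSplitc c xs with
        | nil => exact absurd h (pvSplitc_ne_nil c xs)
        | cons h t => simp

theorem pvSplitOn_eq (c : Char) (s : List Char) :
    PySem.Chars.splitOn s [c] = pvSplitc c s := by
  rw [PySem.Chars.splitOn, pvGo_eq c s (s.length + 1) [] [] (by omega)]
  cases h : pvSplitc c s with
  | nil => exact absurd h (pvSplitc_ne_nil c s)
  | cons h t => simp

-- A's counter-driven fold appends exactly the first (n - l)·pieces, each followed by the separator.
theorem pvFold_eq (c : Char) (n : Int) :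
    ∀ (d : List (List Char)) (p : List Char) (l : Int),
      (d.foldl (fun (st : List Char × Int) i =>
          (if st.2 < n then st.1 ++ i ++ [c] else st.1, st.2 + 1)) (p, l)).1
        = p ++ (d.take (n - l).toNat).flatMap (fun i => i ++ [c]) := by
  intro d
  induction d with
  | nil => intro p l; simp
  | cons i rest ih =>
    intro p l
    simp only [List.foldl_cons]
    rw [ih]
    by_cases h : l < n
    · have ht : (n - l).toNat = (n - (l + 1)).toNat + 1 := by omega
      rw [if_pos h, ht, List.take_succ_cons, List.flatMap_cons]
      simp [List.append_assoc]
    · have h0 : (n - l).toNat = 0 := by omega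
      have h1 : (n - (l + 1)).toNat = 0 := by omega
      rw [if_neg h, h0, h1]
      simp

theorem pvSplitc_length_eq_one (c : Char) (xs : List Char) :
    (pvSplitc c xs).length = 1 ↔ c ∉ xs := by
  induction xs with
  | nil => simp [pvSplitc]
  | cons x xs ih =>
    simp only [pvSplitc]
    by_cases hx : x = c
    · subst hx
      rw [if_pos rfl]
      apply iff_of_false
      · intro hl
        have h0 : (pvSplitc x xs).length = 0 := by simpa using hl
        exact pvSplitc_ne_nil x xs (List.length_eq_zero_iff.mp h0)
      · simp
    · rw [if_neg hx]
      cases h : pvSplitc c xs with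
      | nil => exact absurd h (pvSplitc_ne_nil c xs)
      | cons hd t =>
        rw [h] at ih
        simp only [List.length_cons] at ih ⊢
        simp only [List.mem_cons]
        constructor
        · intro hl hmem
          rcases hmem with h1 | h2
          · exact hx h1.symm
          · exact (ih.mp hl) h2
        · intro hmem
          exact ih.mpr (fun hc => hmem (Or.inr hc))

theorem pvRdropWhile_cons (p : Char → Bool) (x : Char) (xs : List Char) :
    List.rdropWhile p (x :: xs) =
      if List.rdropWhile p xs = [] then (if p x then [] else [x])
      else x :: List.rdropWhile p xs := by
  simp only [List.rdropWhile, List.reverse_cons, List.dropWhile_append]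
  by_cases h : List.dropWhile p xs.reverse = []
  · simp [h, List.dropWhile]
    split <;> simp_all
  · simp [h, List.isEmpty_iff, List.reverse_eq_nil_iff]

-- joining all but the last piece (sep re-attached) recovers the prefix up to the last separator
theorem pvJoin_dropLast (c : Char) (xs : List Char) :
    ((pvSplitc c xs).dropLast).flatMap (fun i => i ++ [c]) =
      List.rdropWhile (fun x => x ≠ c) xs := by
  induction xs with
  | nil => simp [pvSplitc, List.rdropWhile]
  | cons x xs ih =>
    by_cases hx : x = c
    · subst hx
      simp only [pvSplitc]
      cases hS : pvSplitc x xs with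
      | nil => exact absurd hS (pvSplitc_ne_nil x xs)
      | cons hd t =>
        rw [hS] at ih
        rw [pvRdropWhile_cons]
        simp only [← ih]
        split <;> simp_all
    · simp only [pvSplitc, if_neg hx]
      cases hS : pvSplitc c xs with
      | nil => exact absurd hS (pvSplitc_ne_nil c xs)
      | cons hd t =>
        rw [hS] at ih
        rw [pvRdropWhile_cons]
        cases t with
        | nil =>
          have hnotin : c ∉ xs := (pvSplitc_length_eq_one c xs).mp (by rw [hS]; rfl)
          have hnil : List.rdropWhile (fun x => x ≠ c) xs = [] := by
            rw [List.rdropWhile_eq_nil_iff]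
            intro y hy
            simp only [decide_eq_true_eq]
            exact fun h => hnotin (h ▸ hy)
          rw [if_pos hnil]
          simp [hx]
        | cons t0 ts =>
          have hin : c ∈ xs := by
            by_contra hnotin
            have := (pvSplitc_length_eq_one c xs).mpr hnotin
            rw [hS] at this
            simp at this
          have hne : List.rdropWhile (fun x => x ≠ c) xs ≠ [] := by
            rw [Ne, List.rdropWhile_eq_nil_iff]
            intro hall
            have := hall c hin
            simp at this
          rw [if_neg hne, ← ih]
          simp [List.dropLast_cons₂]

theorem pvRfindGo_ge (s : List Char) (c : Char) (j : Nat) :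
    -1 ≤ PySem.Chars.rfind.go s [c] j := by
  induction j with
  | zero => simp only [PySem.Chars.rfind.go]; split <;> omega
  | succ j ih => simp only [PySem.Chars.rfind.go]; split <;> omega

theorem pvRfindGo_take (s : List Char) (c : Char) :
    ∀ (j : Nat), j ≤ s.length →
      s.take (PySem.Chars.rfind.go s [c] j + 1).toNat =
        List.rdropWhile (fun x => x ≠ c) (s.take (j + 1)) := by
  intro j
  induction j with
  | zero =>
    intro _
    cases s with
    | nil => simp [PySem.Chars.rfind.go, List.isPrefixOf, List.rdropWhile]
    | cons a as =>
      simp only [PySem.Chars.rfind.go, List.isPrefixOf, Bool.and_true, List.take_succ_cons,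
        List.take_zero]
      rw [pvRdropWhile_cons]
      simp only [List.rdropWhile_nil, if_pos]
      by_cases hac : c = a
      · subst hac
        simp
      · rw [if_neg (by simpa using hac)]
        have : (decide (a ≠ c)) = true := by
          simp only [decide_eq_true_eq]
          exact fun h => hac h.symm
        simp [this]
  | succ j ih =>
    intro hj
    have hj' : j ≤ s.length := by omega
    simp only [PySem.Chars.rfind.go]
    by_cases hpre : [c].isPrefixOf (s.drop (j + 1)) = true
    · have hlt : j + 1 < s.length := by
        by_contra hge
        have : s.drop (j + 1) = [] := List.drop_eq_nil_of_le (by omega)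
        rw [this] at hpre
        simp [List.isPrefixOf] at hpre
      have hdrop := List.drop_eq_getElem_cons hlt
      rw [hdrop] at hpre
      have hc : s[j + 1] = c := by
        simp [List.isPrefixOf] at hpre
        exact hpre.symm
      rw [if_pos (by rw [hdrop]; simpa [List.isPrefixOf] using hpre)]
      have htn : (((j + 1 : Nat) : Int) + 1).toNat = j + 2 := by omega
      rw [htn]
      have htake : s.take (j + 1 + 1) = s.take (j + 1) ++ [s[j + 1]] := by
        rw [List.take_add_one]
        simp [List.getElem?_eq_getElem hlt]
      rw [htake, List.rdropWhile_concat_neg _ _ _ (by simp [hc])]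
    · rw [if_neg hpre, ih hj']
      by_cases hlt : j + 1 < s.length
      · have htake : s.take (j + 1 + 1) = s.take (j + 1) ++ [s[j + 1]] := by
          rw [List.take_add_one]
          simp [List.getElem?_eq_getElem hlt]
        have hc : s[j + 1] ≠ c := by
          intro h
          apply hpre
          rw [List.drop_eq_getElem_cons hlt, h]
          simp [List.isPrefixOf]
        rw [htake, List.rdropWhile_concat_pos _ _ _ (by simp [hc])]
      · have hlen : s.length ≤ j + 1 := by omega
        rw [List.take_of_length_le hlen, List.take_of_length_le (show s.length ≤ j + 1 + 1 by omega)]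

theorem pvA_eq_pvB (s : List Char) :
    ((PySem.Chars.splitOn s ['\\']).foldl
        (fun (st : List Char × Int) i =>
          (if st.2 < ((PySem.Chars.splitOn s ['\\']).length : Int) then st.1 ++ i ++ ['\\'] else st.1,
           st.2 + 1))
        ([], 1)).1
    = PySem.Chars.slice s none (some (PySem.Chars.rfind s ['\\'] + 1)) := by
  rw [pvSplitOn_eq, pvFold_eq]
  have h1 : (((pvSplitc '\\' s).length : Int) - 1).toNat = (pvSplitc '\\' s).length - 1 := by omega
  rw [h1, ← List.dropLast_eq_take, List.nil_append, pvJoin_dropLast]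
  have hge := pvRfindGo_ge s '\\' s.length
  rw [PySem.Chars.rfind]
  have h2 : PySem.Chars.rfind.go s ['\\'] s.length + 1 =
      (((PySem.Chars.rfind.go s ['\\'] s.length + 1).toNat : Nat) : Int) := by omega
  rw [PySem.Chars.slice_eq_listSlice, h2, PySem.List.slice_to_natCast]
  rw [pvRfindGo_take s '\\' s.length le_rfl]
  rw [List.take_of_length_le (by omega)]

-- ===== VERDICT (by name: the statement is the Claim_ definition above) =====
theorem create_text_file_path_spec : Claim_equal_create_text_file_path := by
  intro path1 _
  unfold Spec_create_text_file_path create_text_file_path create_text_file_path_alt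
  exact congrArg String.ofList (congrArg (· ++ "Text_Map.txt".toList) (pvA_eq_pvB path1.toList))
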